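-- pv_equiv track=rewrite | github.com/ichanner/project-final | services/heuristic/src/heuristics.py | _coerce_to_schema
-- ===== SOURCE A (Python) =====
-- from typing import Any
--
-- def _coerce_to_schema(entities: list[dict[str, Any]], schema: dict[str, Any]) -> list[dict[str, Any]]:
--     fields = schema.get("fields") if isinstance(schema, dict) else None
--     if not isinstance(fields, dict) or not fields:
--         return entities
--     coerced = []
--     for ent in entities:
--         out = {}
--         # Case-insensitive lookup of source keys.
--         lower = {k.lower(): v for k, v in ent.items()}
--         for field_name in fields:
--             v = lower.get(field_name.lower())
--             out[field_name] = v if v is not None else None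
--         # Drop entries where every field is None — those aren't real matches.
--         if any(v is not None for v in out.values()):
--             coerced.append(out)
--     return coerced
-- ===== SOURCE B (Python) =====
-- from typing import Any
--
-- def _coerce_to_schema(entities: list[dict[str, Any]], schema: dict[str, Any]) -> list[dict[str, Any]]:
--     fields = schema.get("fields") if isinstance(schema, dict) else None
--     if not isinstance(fields, dict) or not fields:
--         return entities
--     # Reverse index: lowercased field name -> every schema field name with that lowercase.
--     index: dict[str, list] = {}
--     for f in fields:
--         index.setdefault(f.lower(), []).append(f)
--     coerced = []
--     for ent in entities:
--         out = {f: None for f in fields}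
--         for k, v in ent.items():
--             for f in index.get(k.lower(), ()):
--                 out[f] = v
--         if any(v is not None for v in out.values()):
--             coerced.append(out)
--     return coerced
-- ===== Notes on version B (the rewrite author's own statement) =====
-- stated objective: alternative
-- what changed: Instead of building a lowercased copy of each entity and looking every schema field up in it, B builds once a reverse index from lowercased field name to the schema field names, pre-initialises each output row to all-None in field order, and makes one pass over each entity's own items, fanning each value out to the matching fields (last source item wins, as in A).
import Mathlib
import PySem

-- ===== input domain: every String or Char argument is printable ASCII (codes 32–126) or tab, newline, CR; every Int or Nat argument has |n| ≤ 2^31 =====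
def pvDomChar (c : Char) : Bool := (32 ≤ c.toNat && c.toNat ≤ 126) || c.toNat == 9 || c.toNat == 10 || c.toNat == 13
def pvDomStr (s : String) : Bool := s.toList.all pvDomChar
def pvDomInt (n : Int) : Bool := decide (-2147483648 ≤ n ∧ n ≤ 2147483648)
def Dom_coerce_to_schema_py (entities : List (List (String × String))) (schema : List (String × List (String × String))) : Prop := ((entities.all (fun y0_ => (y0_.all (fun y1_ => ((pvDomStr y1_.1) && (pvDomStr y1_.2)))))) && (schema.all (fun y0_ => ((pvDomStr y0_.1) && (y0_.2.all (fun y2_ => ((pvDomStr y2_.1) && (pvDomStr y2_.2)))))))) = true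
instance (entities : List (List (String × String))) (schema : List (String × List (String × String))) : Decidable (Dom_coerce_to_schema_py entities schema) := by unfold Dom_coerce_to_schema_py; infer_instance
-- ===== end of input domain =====

-- B replaces A's per-entity lowercased copy of the entity by a reverse index (lowercased field
-- name → schema field names) built once, a pre-initialised all-None row, and one pass over the
-- entity's own items (objective: alternative decomposition, same cost).

-- ===== PORT A =====
-- lower = {k.lower(): v for k, v in ent.items()}
def pyLowerDict (items : List (String × String)) : PySem.Dict String String :=
  items.foldl (fun d p => d.insert (PySem.Str.lower p.1) p.2) PySem.Dict.empty

-- out = {}; for field_name in fields: out[field_name] = lower.get(field_name.lower()) (None if absent)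
def pyOutA (fk : List String) (L : PySem.Dict String String) : PySem.Dict String (Option String) :=
  fk.foldl (fun o f => o.insert f (L.get? (PySem.Str.lower f))) PySem.Dict.empty

-- On the `return entities` branch (no "fields" dict, or an empty one) Python hands the input
-- rows back unchanged; at the declared return type their str values are the present Optional
-- values, i.e. each row with `some` on every value.
def coerce_to_schema_py (entities : List (List (String × String))) (schema : List (String × List (String × String))) : List (List (String × Option String)) :=
  match (PySem.Dict.ofList schema).get? "fields" with
  | none => entities.map (fun ent => ent.map (fun p => (p.1, some p.2)))
  | some fields =>
    if fields.isEmpty then entities.map (fun ent => ent.map (fun p => (p.1, some p.2)))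
    else
      entities.foldl (fun coerced ent =>
        let out := pyOutA (PySem.Dict.ofList fields).keys (pyLowerDict (PySem.Dict.ofList ent).items)
        if out.values.any (fun v => v.isSome) then coerced ++ [out.items] else coerced) []

-- ===== PORT B =====
-- index = {}; for f in fields: index.setdefault(f.lower(), []).append(f)
def pyIndex (fk : List String) : PySem.Dict String (List String) :=
  fk.foldl (fun d f => d.modify (PySem.Str.lower f) [] (fun l => l ++ [f])) PySem.Dict.empty

-- out = {f: None for f in fields}; for k, v in ent.items(): for f in index.get(k.lower(), ()): out[f] = v
def pyOutB (fk : List String) (idx : PySem.Dict String (List String)) (items : List (String × String)) : PySem.Dict String (Option String) :=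
  items.foldl
    (fun o p => (idx.getD (PySem.Str.lower p.1) []).foldl (fun o f => o.insert f (some p.2)) o)
    (fk.foldl (fun o f => o.insert f (none : Option String)) PySem.Dict.empty)

def coerce_to_schema_py_alt (entities : List (List (String × String))) (schema : List (String × List (String × String))) : List (List (String × Option String)) :=
  match (PySem.Dict.ofList schema).get? "fields" with
  | none => entities.map (fun ent => ent.map (fun p => (p.1, some p.2)))
  | some fields =>
    if fields.isEmpty then entities.map (fun ent => ent.map (fun p => (p.1, some p.2)))
    else
      let fk := (PySem.Dict.ofList fields).keys
      let idx := pyIndex fk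
      entities.foldl (fun coerced ent =>
        let out := pyOutB fk idx (PySem.Dict.ofList ent).items
        if out.values.any (fun v => v.isSome) then coerced ++ [out.items] else coerced) []

-- ===== PRECONDITION & SPEC =====
def Spec_coerce_to_schema_py (entities : List (List (String × String))) (schema : List (String × List (String × String))) (out : List (List (String × Option String))) : Prop := out = coerce_to_schema_py_alt entities schema
instance (entities : List (List (String × String))) (schema : List (String × List (String × String))) (out : List (List (String × Option String))) : Decidable (Spec_coerce_to_schema_py entities schema out) := by unfold Spec_coerce_to_schema_py; infer_instance

-- ===== CLAIM (what is proved, stated in full; the proofs are below) =====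
def Claim_equal_coerce_to_schema_py : Prop := ∀ (entities : List (List (String × String))) (schema : List (String × List (String × String))), Dom_coerce_to_schema_py entities schema → Spec_coerce_to_schema_py entities schema (coerce_to_schema_py entities schema)

-- ===== LEMMAS AND PROOFS =====

-- The reverse index at lowercase c holds exactly the field names whose lowercase is c, in order.
theorem pyIndex_getD (fk : List String) (c : String) :
    (pyIndex fk).getD c [] = fk.filter (fun f => PySem.Str.lower f == c) := by
  unfold pyIndex
  have h : fk.foldl (fun d f => d.modify (PySem.Str.lower f) [] (fun l => l ++ [f])) PySem.Dict.empty
      = (fk.map (fun f => (PySem.Str.lower f, f))).foldl (fun d p => d.modify p.1 [] (fun l => l ++ [p.2])) PySem.Dict.empty := by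
    rw [List.foldl_map]
  rw [h, PySem.Dict.getD_foldl_modify_append, PySem.Dict.getD_empty]
  simp only [List.filter_map, List.map_map]
  have : ((fun (x : String × String) => x.2) ∘ fun f => (PySem.Str.lower f, f)) = id := rfl
  rw [this, List.map_id]
  congr 1

-- A run of constant-value inserts: the final value is the constant iff the key occurs.
theorem getD_foldl_insert_const (l : List String) (o : PySem.Dict String (Option String)) (x : String) (w : Option String) :
    (l.foldl (fun o f => o.insert f w) o).getD x none = if x ∈ l then w else o.getD x none := by
  induction l generalizing o with
  | nil => simp
  | cons f rest ih =>
    simp only [List.foldl_cons, ih, PySem.Dict.getD_insert, List.mem_cons]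
    by_cases h1 : x ∈ rest <;> by_cases h2 : x = f <;> simp [h1, h2]

-- A's lowercasing loop: lookup is the LAST entity item whose lowercased key is c.
theorem get?_lower_fold (items : List (String × String)) (d : PySem.Dict String String) (c : String) :
    (items.foldl (fun d p => d.insert (PySem.Str.lower p.1) p.2) d).get? c
      = match items.reverse.find? (fun p => PySem.Str.lower p.1 == c) with
        | some p => some p.2
        | none => d.get? c := by
  induction items generalizing d with
  | nil => simp
  | cons p rest ih =>
    simp only [List.foldl_cons, ih, List.reverse_cons, List.find?_append]
    cases h : rest.reverse.find? (fun p => PySem.Str.lower p.1 == c) with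
    | some q => simp
    | none =>
      simp only [Option.none_or, List.find?_singleton]
      by_cases hc : PySem.Str.lower p.1 = c
      · simp [hc, PySem.Dict.get?_insert_self]
      · simp [hc, PySem.Dict.get?_insert_of_ne _ _ (Ne.symm hc)]

-- B's entity pass never adds a key: it only overwrites keys the pre-initialised row already has.
theorem keys_pyOutB_fold (fk : List String) (items : List (String × String)) (o : PySem.Dict String (Option String)) (ho : o.keys = fk) :
    (items.foldl (fun o p => ((pyIndex fk).getD (PySem.Str.lower p.1) []).foldl (fun o f => o.insert f (some p.2)) o) o).keys = fk := by
  induction items generalizing o with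
  | nil => exact ho
  | cons p rest ih =>
    simp only [List.foldl_cons]
    apply ih
    rw [PySem.Dict.keys_foldl_insert _ (fun _ f => some p.2) o, PySem.Set.update_eq_append_filter, ho]
    have : (PySem.Set.ofList ((pyIndex fk).getD (PySem.Str.lower p.1) [])).filter
        (fun y => !(PySem.Set.contains fk y)) = [] := by
      apply List.filter_eq_nil_iff.mpr
      intro y hy
      have hyk : y ∈ fk := by
        have := (PySem.Set.mem_ofList _ _).mp hy
        rw [pyIndex_getD] at this
        exact (List.mem_filter.mp this).1
      simp
      exact hyk
    rw [this, List.append_nil]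

-- B's entity pass: for a field key x, the final value is the LAST entity item with matching lowercase.
theorem getD_pyOutB_fold (fk : List String) (items : List (String × String)) (o : PySem.Dict String (Option String)) (x : String) (hx : x ∈ fk) :
    (items.foldl (fun o p => ((pyIndex fk).getD (PySem.Str.lower p.1) []).foldl (fun o f => o.insert f (some p.2)) o) o).getD x none
      = match items.reverse.find? (fun p => PySem.Str.lower p.1 == PySem.Str.lower x) with
        | some p => some p.2
        | none => o.getD x none := by
  induction items generalizing o with
  | nil => simp
  | cons p rest ih =>
    simp only [List.foldl_cons, ih, List.reverse_cons, List.find?_append]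
    cases h : rest.reverse.find? (fun p => PySem.Str.lower p.1 == PySem.Str.lower x) with
    | some q => simp
    | none =>
      simp only [Option.none_or, List.find?_singleton]
      rw [getD_foldl_insert_const, pyIndex_getD]
      by_cases hc : PySem.Str.lower p.1 = PySem.Str.lower x
      · simp [hc]
        exact fun hxf => absurd hx hxf
      · have hmem : x ∉ fk.filter (fun f => PySem.Str.lower f == PySem.Str.lower p.1) := by
          simp [List.mem_filter]
          intro _
          exact fun h' => hc (h'.symm)
        simp [hc]
        exact fun _ h' => absurd h'.symm hc

-- The key list of B's row is exactly the (Nodup) field-key list.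
theorem keys_pyOutB (fk : List String) (hfk : fk.Nodup) (items : List (String × String)) :
    (pyOutB fk (pyIndex fk) items).keys = fk := by
  unfold pyOutB
  apply keys_pyOutB_fold
  rw [PySem.Dict.keys_foldl_insert fk (fun _ _ => (none : Option String)) PySem.Dict.empty]
  simp [PySem.Set.update_nil_left]
  exact PySem.Set.ofList_eq_self_of_nodup _ hfk

-- Per-entity agreement of the two row constructions.
theorem outA_eq_outB (fk : List String) (hfk : fk.Nodup) (items : List (String × String)) :
    pyOutA fk (pyLowerDict items) = pyOutB fk (pyIndex fk) items := by
  apply PySem.Dict.ext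
  have hA : (pyOutA fk (pyLowerDict items)).items
      = fk.map (fun f => (f, (pyLowerDict items).get? (PySem.Str.lower f))) := by
    unfold pyOutA
    have := PySem.Dict.items_foldl_insert_fresh (l := fk) (k := id)
      (v := fun f => (pyLowerDict items).get? (PySem.Str.lower f)) (d := PySem.Dict.empty)
      (by intro a _; simp) (by simpa using hfk)
    simpa using this
  have hkeys := keys_pyOutB fk hfk items
  have hB : (pyOutB fk (pyIndex fk) items).items
      = fk.map (fun f => (f, (pyOutB fk (pyIndex fk) items).getD f none)) := by
    have := PySem.Dict.items_eq_map_keys (pyOutB fk (pyIndex fk) items) (by rw [hkeys]; exact hfk) none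
    rw [this, hkeys]
  rw [hA, hB]
  apply List.map_congr_left
  intro f hf
  congr 1
  unfold pyOutB
  rw [getD_pyOutB_fold fk items _ f hf]
  unfold pyLowerDict
  rw [get?_lower_fold items PySem.Dict.empty (PySem.Str.lower f), getD_foldl_insert_const]
  simp

-- ===== VERDICT (by name: the statement is the Claim_ definition above) =====
theorem coerce_to_schema_py_spec : Claim_equal_coerce_to_schema_py := by
  intro entities schema _
  unfold Spec_coerce_to_schema_py coerce_to_schema_py coerce_to_schema_py_alt
  cases (PySem.Dict.ofList schema).get? "fields" with
  | none => rfl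
  | some fields =>
    simp only
    split
    · rfl
    · have h := fun ent => outA_eq_outB (PySem.Dict.ofList fields).keys (PySem.Dict.nodup_keys_ofList fields) (PySem.Dict.ofList ent).items
      simp only [h]
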